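-- pv_equiv track=rewrite | github.com/sangka9/codingPractice | programmers/secretMap.py | solution
-- ===== SOURCE A (Python) =====
-- def solution(n, arr1, arr2):
--     answer = []
--     board1 = []
--     board2 = []
--
--     for i in range(n) :
--         board1.append(binary(arr1[i], n))
--         board2.append(binary(arr2[i], n))
--
--         tmp = ""
--         for j in range(n) :
--             if(board1[i][j] or board2[i][j]) :
--                 tmp = tmp + "#"
--             else :
--                 tmp = tmp + " "
--
--         answer.append(tmp)
--
--     return answer
--
-- def binary(n, length) :
--     bi = []
--
--     while(length) :
--         bi.append(n % 2)
--         n = n // 2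
--         length = length - 1
--
--     bi.reverse()
--
--     return bi
-- ===== SOURCE B (Python) =====
-- def solution(n, arr1, arr2):
--     width = max(n, 0)
--     return [''.join('#' if ((a | b) >> (width - 1 - j)) & 1 else ' '
--                     for j in range(width))
--             for a, b in zip(arr1[:width], arr2[:width])]
-- ===== Notes on version B (the rewrite author's own statement) =====
-- stated objective: alternative
-- what changed: B drops A's per-bit list machinery (building bit-lists with repeated // and % into two board lists) and instead ORs the two row integers with a single bitwise |, reading each output character directly off the shifted OR; rows come from zip over slices instead of indexed loops.
import Mathlib
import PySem

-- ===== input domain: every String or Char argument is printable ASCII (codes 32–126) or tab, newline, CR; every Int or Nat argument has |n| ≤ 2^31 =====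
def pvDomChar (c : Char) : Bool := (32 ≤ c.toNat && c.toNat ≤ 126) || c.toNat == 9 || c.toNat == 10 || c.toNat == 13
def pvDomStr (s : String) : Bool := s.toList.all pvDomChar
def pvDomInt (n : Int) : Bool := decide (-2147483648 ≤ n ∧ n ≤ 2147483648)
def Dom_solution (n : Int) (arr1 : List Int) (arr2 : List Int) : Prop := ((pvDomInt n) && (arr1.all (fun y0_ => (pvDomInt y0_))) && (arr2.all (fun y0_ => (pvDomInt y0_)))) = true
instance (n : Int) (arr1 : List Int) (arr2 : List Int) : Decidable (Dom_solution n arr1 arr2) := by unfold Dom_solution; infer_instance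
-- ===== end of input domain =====

-- B replaces A's per-bit list machinery by one integer bitwise OR per row, reading each
-- character off the shifted OR directly (objective: alternative).

-- ===== PORT A =====
-- helper binary(n, length): the while(length) loop runs exactly `length` times
-- (A only calls it with length = n ≥ 1, where `length.toNat` fuel is exact)
def pyBinaryGo (x : Int) (fuel : Nat) (bi : List Int) : List Int :=
  match fuel with
  | 0 => bi
  | Nat.succ f => pyBinaryGo (PySem.Int.floordiv x 2) f (bi ++ [PySem.Int.mod x 2])

def pyBinary (x : Int) (length : Int) : List Int :=
  (pyBinaryGo x length.toNat []).reverse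

-- arr1[i], arr2[i], board[i][j] use pyGetD (total form); every index is in range under Pre_
def solution (n : Int) (arr1 : List Int) (arr2 : List Int) : List String :=
  ((PySem.List.pyRange 0 n 1).foldl
    (fun (st : List String × List (List Int) × List (List Int)) (i : Int) =>
      let board1 := st.2.1 ++ [pyBinary (PySem.List.pyGetD arr1 i 0) n]
      let board2 := st.2.2 ++ [pyBinary (PySem.List.pyGetD arr2 i 0) n]
      let tmp := (PySem.List.pyRange 0 n 1).foldl
        (fun (t : List Char) (j : Int) =>
          if PySem.List.pyGetD (PySem.List.pyGetD board1 i []) j 0 ≠ 0 ∨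
             PySem.List.pyGetD (PySem.List.pyGetD board2 i []) j 0 ≠ 0
          then t ++ ['#'] else t ++ [' ']) []
      (st.1 ++ [String.mk tmp], board1, board2))
    ([], [], [])).1

-- ===== PORT B =====
def solution_alt (n : Int) (arr1 : List Int) (arr2 : List Int) : List String :=
  let width := max n 0
  (List.zip (PySem.List.slice arr1 none (some width)) (PySem.List.slice arr2 none (some width))).map
    (fun ab => String.mk ((PySem.List.pyRange 0 width 1).map
      (fun j => if PySem.Int.band ((PySem.Int.bor ab.1 ab.2) >>> (width - 1 - j).toNat) 1 ≠ 0
                then '#' else ' ')))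

-- ===== PRECONDITION & SPEC =====
-- A indexes arr1[i], arr2[i] for every i < n: Pre_ excludes exactly the inputs where that raises IndexError
def Pre_solution (n : Int) (arr1 : List Int) (arr2 : List Int) : Prop :=
  n ≤ arr1.length ∧ n ≤ arr2.length
instance (n : Int) (arr1 : List Int) (arr2 : List Int) : Decidable (Pre_solution n arr1 arr2) := by unfold Pre_solution; infer_instance
def pvWitness_solution : Int × List Int × List Int := (2, [1, 2], [3, 0])

def Spec_solution (n : Int) (arr1 : List Int) (arr2 : List Int) (out : List String) : Prop := out = solution_alt n arr1 arr2
instance (n : Int) (arr1 : List Int) (arr2 : List Int) (out : List String) : Decidable (Spec_solution n arr1 arr2 out) := by unfold Spec_solution; infer_instance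

-- ===== CLAIM (what is proved, stated in full; the proofs are below) =====
def Claim_equal_solution : Prop := ∀ (n : Int) (arr1 : List Int) (arr2 : List Int), Dom_solution n arr1 arr2 → Pre_solution n arr1 arr2 → Spec_solution n arr1 arr2 (solution n arr1 arr2)

-- ===== LEMMAS AND PROOFS =====

-- Nat.ldiff is masked subtraction (used to identify PySem's bor with Int.lor)
theorem pvLdiffEq (n m : Nat) : Nat.ldiff n m = n - (n &&& m) := by
  induction n using Nat.binaryRec generalizing m with
  | zero => simp [Nat.ldiff]
  | bit b n ih =>
    induction m using Nat.binaryRec with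
    | zero => simp [Nat.ldiff]
    | bit c m _ =>
      rw [Nat.ldiff_bit, Nat.land_bit, ih m, Nat.bit_val, Nat.bit_val, Nat.bit_val]
      have h : n &&& m ≤ n := Nat.and_le_left
      cases b <;> cases c <;> simp <;> omega

theorem pvBorEqLor (a b : Int) : PySem.Int.bor a b = Int.lor a b := by
  rcases a with m | m <;> rcases b with n | n <;>
    simp [PySem.Int.bor, Int.lor, pvLdiffEq, Int.negSucc_eq] <;>
    (repeat rw [if_neg (by omega)]) <;> ring

theorem pvModShift (x : Int) (k : Nat) :
    PySem.Int.mod (x >>> k) 2 = if x.testBit k then 1 else 0 := by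
  rcases x with m | m
  · show PySem.Int.mod (Int.ofNat (m >>> k)) 2 = _
    rw [PySem.Int.mod_eq_emod_of_pos (by norm_num : (0:Int) < 2)]
    have h : (Int.ofNat m).testBit k = m.testBit k := rfl
    rw [h, Nat.testBit_eq_decide_div_mod_eq, Nat.shiftRight_eq_div_pow]
    have h3 : (Int.ofNat (m / 2 ^ k)) % 2 = Int.ofNat ((m / 2 ^ k) % 2) := by
      simp [Int.ofNat_eq_natCast]
    rw [h3]
    rcases Nat.mod_two_eq_zero_or_one (m / 2 ^ k) with h2 | h2 <;> simp [h2]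
  · show PySem.Int.mod (Int.negSucc (m >>> k)) 2 = _
    rw [PySem.Int.mod_eq_emod_of_pos (by norm_num : (0:Int) < 2)]
    have h : (Int.negSucc m).testBit k = !(m.testBit k) := rfl
    rw [h, Nat.testBit_eq_decide_div_mod_eq, Nat.shiftRight_eq_div_pow, Int.negSucc_eq]
    generalize m / 2 ^ k = q
    rcases Nat.mod_two_eq_zero_or_one q with h2 | h2 <;>
      simp only [h2] <;> simp <;> omega

theorem pvMod2 (x : Int) : PySem.Int.mod x 2 = if x.testBit 0 then 1 else 0 := by
  have h := pvModShift x 0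
  simpa using h

theorem pvFloordivTwo (x : Int) : PySem.Int.floordiv x 2 = x >>> (1 : Nat) := by
  rw [PySem.Int.floordiv_eq_ediv_of_pos (by norm_num)]
  have h : x >>> (1 : Nat) = x / ((2 ^ 1 : Nat) : Int) := Int.shiftRight_eq_div_pow x 1
  rw [h]; norm_num

theorem pvTestBitShift (x : Int) (s k : Nat) : (x >>> s).testBit k = x.testBit (s + k) := by
  rcases x with m | m
  · show (Int.ofNat (m >>> s)).testBit k = _
    have h1 : (Int.ofNat (m >>> s)).testBit k = (m >>> s).testBit k := rfl
    have h2 : (Int.ofNat m).testBit (s + k) = m.testBit (s + k) := rfl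
    rw [h1, h2, Nat.testBit_shiftRight]
  · show (Int.negSucc (m >>> s)).testBit k = _
    have h1 : (Int.negSucc (m >>> s)).testBit k = !(m >>> s).testBit k := rfl
    have h2 : (Int.negSucc m).testBit (s + k) = !m.testBit (s + k) := rfl
    rw [h1, h2, Nat.testBit_shiftRight]

-- the bit list binary(x, n) produces, LSB first
theorem pvBinaryGoEq (x : Int) (fuel : Nat) (acc : List Int) :
    pyBinaryGo x fuel acc =
      acc ++ (List.range fuel).map (fun k => if x.testBit k then (1:Int) else 0) := by
  induction fuel generalizing x acc with
  | zero => simp [pyBinaryGo]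
  | succ f ih =>
    rw [pyBinaryGo, ih, List.append_assoc, List.range_succ_eq_map]
    congr 1
    simp only [List.map_cons, List.map_map, List.singleton_append]
    congr 1
    · rw [pvMod2]
    · apply List.map_congr_left
      intro k _
      simp only [Function.comp_apply, pvFloordivTwo, pvTestBitShift, Nat.succ_eq_add_one,
        Nat.add_comm]

theorem pvBinaryEq (x : Int) (N : Nat) :
    pyBinary x (N : Int) =
      (List.range N).map (fun j => if x.testBit (N - 1 - j) then (1:Int) else 0) := by
  rw [pyBinary, Int.toNat_natCast, pvBinaryGoEq, List.nil_append]
  apply List.ext_getElem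
  · simp
  · intro j h1 h2
    simp only [List.length_reverse, List.length_map, List.length_range] at h1
    rw [List.getElem_reverse]
    simp only [List.getElem_map, List.getElem_range, List.length_map, List.length_range]

-- the character row both programs produce for a row value v (as bits of v, MSB first)
def pvRowChars (v : Int) (N : Nat) : List Char :=
  (List.range N).map (fun j => if v.testBit (N - 1 - j) then '#' else ' ')

-- inner loop of A: the row string for row index i, given the two board rows
theorem pvInnerRow (n : Int) (N : Nat) (hn : n = (N : Int)) (r1 r2 : List Int) (a b : Int)
    (h1 : r1 = (List.range N).map (fun j => if a.testBit (N - 1 - j) then (1:Int) else 0))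
    (h2 : r2 = (List.range N).map (fun j => if b.testBit (N - 1 - j) then (1:Int) else 0)) :
    (PySem.List.pyRange 0 n 1).foldl
      (fun (t : List Char) (j : Int) =>
        if PySem.List.pyGetD r1 j 0 ≠ 0 ∨ PySem.List.pyGetD r2 j 0 ≠ 0
        then t ++ ['#'] else t ++ [' ']) [] = pvRowChars (Int.lor a b) N := by
  have hstep : ∀ (t : List Char) (j : Int), j ∈ PySem.List.pyRange 0 n 1 →
      (if PySem.List.pyGetD r1 j 0 ≠ 0 ∨ PySem.List.pyGetD r2 j 0 ≠ 0
       then t ++ ['#'] else t ++ [' ']) =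
      t ++ [if PySem.List.pyGetD r1 j 0 ≠ 0 ∨ PySem.List.pyGetD r2 j 0 ≠ 0 then '#' else ' '] := by
    intro t j _; split <;> rfl
  rw [PySem.List.foldl_congr_mem _ _ (fun (t : List Char) (j : Int) =>
        t ++ [if PySem.List.pyGetD r1 j 0 ≠ 0 ∨ PySem.List.pyGetD r2 j 0 ≠ 0 then '#' else ' ']) _ hstep,
      PySem.List.foldl_append_singleton_eq_map, List.nil_append]
  subst hn h1 h2
  rw [PySem.List.pyRange_one]
  simp only [Int.sub_zero, Int.toNat_natCast, List.map_map, pvRowChars]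
  apply List.map_congr_left
  intro j hj
  rw [List.mem_range] at hj
  simp only [Function.comp_apply, Int.zero_add]
  rw [PySem.List.pyGetD_natCast, PySem.List.pyGetD_natCast]
  rw [List.getD_eq_getElem _ _ (by simpa using hj), List.getD_eq_getElem _ _ (by simpa using hj)]
  simp only [List.getElem_map, List.getElem_range]
  rw [Int.testBit_lor]
  rcases ha : a.testBit (N - 1 - j) <;> rcases hb : b.testBit (N - 1 - j) <;> simp

-- A's main loop invariant
theorem pvMainFold (n : Int) (N : Nat) (hn : n = (N : Int)) (arr1 arr2 : List Int)
    (k : Nat) (hk : k ≤ N) :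
    ((PySem.List.pyRange 0 (k : Int) 1).foldl
      (fun (st : List String × List (List Int) × List (List Int)) (i : Int) =>
        let board1 := st.2.1 ++ [pyBinary (PySem.List.pyGetD arr1 i 0) n]
        let board2 := st.2.2 ++ [pyBinary (PySem.List.pyGetD arr2 i 0) n]
        let tmp := (PySem.List.pyRange 0 n 1).foldl
          (fun (t : List Char) (j : Int) =>
            if PySem.List.pyGetD (PySem.List.pyGetD board1 i []) j 0 ≠ 0 ∨
               PySem.List.pyGetD (PySem.List.pyGetD board2 i []) j 0 ≠ 0
            then t ++ ['#'] else t ++ [' ']) []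
        (st.1 ++ [String.mk tmp], board1, board2))
      ([], [], [])) =
      ((List.range k).map (fun i =>
          String.mk (pvRowChars (Int.lor (arr1.getD i 0) (arr2.getD i 0)) N)),
       (List.range k).map (fun i => pyBinary (arr1.getD i 0) n),
       (List.range k).map (fun i => pyBinary (arr2.getD i 0) n)) := by
  induction k with
  | zero => simp [PySem.List.pyRange_one_eq_nil]
  | succ k ih =>
    have hk' : k ≤ N := Nat.le_of_succ_le hk
    have hcast : (((k+1 : Nat)) : Int) = (k : Int) + 1 := by push_cast; ring
    rw [hcast, PySem.List.pyRange_one_succ_right (by positivity), List.foldl_append, ih hk']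
    simp only [List.foldl_cons, List.foldl_nil, PySem.List.pyGetD_natCast]
    have hb1 : ((List.range k).map (fun i => pyBinary (arr1.getD i 0) n)
        ++ [pyBinary (arr1.getD k 0) n]) =
        (List.range (k+1)).map (fun i => pyBinary (arr1.getD i 0) n) := by
      rw [List.range_succ, List.map_append]; rfl
    have hb2 : ((List.range k).map (fun i => pyBinary (arr2.getD i 0) n)
        ++ [pyBinary (arr2.getD k 0) n]) =
        (List.range (k+1)).map (fun i => pyBinary (arr2.getD i 0) n) := by
      rw [List.range_succ, List.map_append]; rfl
    have hrow1 : ((List.range (k+1)).map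
        (fun i => pyBinary (arr1.getD i 0) n)).getD k [] = pyBinary (arr1.getD k 0) n := by
      rw [List.getD_eq_getElem _ _ (by simp)]; simp
    have hrow2 : ((List.range (k+1)).map
        (fun i => pyBinary (arr2.getD i 0) n)).getD k [] = pyBinary (arr2.getD k 0) n := by
      rw [List.getD_eq_getElem _ _ (by simp)]; simp
    rw [hb1, hb2, hrow1, hrow2,
      pvInnerRow n N hn _ _ _ _ (by rw [hn, pvBinaryEq]) (by rw [hn, pvBinaryEq])]
    rw [show List.range (k+1) = List.range k ++ [k] from List.range_succ]
    simp [List.map_append]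

-- B's row for one pair of values
theorem pvAltRow (N : Nat) (a b : Int) :
    (PySem.List.pyRange 0 ((N : Nat) : Int) 1).map
      (fun j => if PySem.Int.band ((PySem.Int.bor a b) >>> ((((N : Nat) : Int)) - 1 - j).toNat) 1 ≠ 0
                then '#' else ' ') = pvRowChars (Int.lor a b) N := by
  rw [PySem.List.pyRange_one]
  simp only [Int.sub_zero, Int.toNat_natCast, List.map_map, pvRowChars]
  apply List.map_congr_left
  intro j hj
  rw [List.mem_range] at hj
  simp only [Function.comp_apply, Int.zero_add]
  have hT : (((N : Int)) - 1 - (j : Int)).toNat = N - 1 - j := by omega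
  rw [hT, PySem.Int.band_one, pvBorEqLor, pvModShift]
  rcases h : (Int.lor a b).testBit (N - 1 - j) <;> simp

-- B in indexed form
theorem pvAltEq (n : Int) (N : Nat) (hn : n = (N : Int)) (arr1 arr2 : List Int)
    (h1 : N ≤ arr1.length) (h2 : N ≤ arr2.length) :
    solution_alt n arr1 arr2 =
      (List.range N).map (fun i =>
        String.mk (pvRowChars (Int.lor (arr1.getD i 0) (arr2.getD i 0)) N)) := by
  subst hn
  unfold solution_alt
  have hw : max ((N : Int)) 0 = (N : Int) := by omega
  simp only [hw]
  rw [PySem.List.slice_to_natCast, PySem.List.slice_to_natCast]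
  apply List.ext_getElem
  · simp; omega
  · intro i hi hi'
    simp only [List.length_map, List.length_range] at hi'
    simp only [List.getElem_map, List.getElem_zip, List.getElem_take, List.getElem_range]
    rw [pvAltRow]
    rw [List.getD_eq_getElem arr1 _ (by omega), List.getD_eq_getElem arr2 _ (by omega)]

-- ===== VERDICT (by name: the statement is the Claim_ definition above) =====
theorem solution_spec : Claim_equal_solution := by
  intro n arr1 arr2 _ hpre
  unfold Pre_solution at hpre
  obtain ⟨hp1, hp2⟩ := hpre
  unfold Spec_solution
  by_cases hpos : 0 < n
  · lift n to Nat using (by omega : 0 ≤ n) with N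
    rw [pvAltEq (N : Int) N rfl arr1 arr2 (by exact_mod_cast hp1) (by exact_mod_cast hp2)]
    show (_ : List String × _).1 = _
    rw [pvMainFold (N : Int) N rfl arr1 arr2 N (le_refl N)]
  · have hA : PySem.List.pyRange 0 n 1 = [] := PySem.List.pyRange_one_eq_nil (by omega)
    have hB : solution_alt n arr1 arr2 = [] := by
      unfold solution_alt
      have hw : max n 0 = 0 := by omega
      rw [hw]
      simp [PySem.List.slice_to]
    rw [hB]
    show (_ : List String × _).1 = _
    rw [hA]
    rfl
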